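-- pv_equiv track=rewrite | github.com/Tric76/pythonStuff | secret-lang rolling 6 clean.py | undo_rolling
-- ===== SOURCE A (Python) =====
-- rolling_step = 8
--
-- def undo_rolling(split_phrase):
--     rolling_message = ""
--     number = ""
--     for i in range(len(split_phrase)):
--         number = split_phrase[i]
--         value = number - (i // rolling_step)
--         rolling_message += str(value)
--     return rolling_message
-- ===== SOURCE B (Python) =====
-- rolling_step = 8
--
-- def undo_rolling(split_phrase):
--     # Block-wise: walk the list in chunks of rolling_step, subtracting the
--     # block number from every element of that chunk; join at the end.
--     out = []
--     block = 0
--     chunk = split_phrase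
--     while chunk:
--         for x in chunk[:rolling_step]:
--             out.append(str(x - block))
--         block += 1
--         chunk = chunk[rolling_step:]
--     return "".join(out)
-- ===== Notes on version B (the rewrite author's own statement) =====
-- stated objective: alternative
-- what changed: B replaces the per-index loop computing i // rolling_step for every element by a block-wise traversal: an outer loop over chunks of 8 with a block counter, an inner loop over the chunk, and a final join of the collected pieces.
import Mathlib
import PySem

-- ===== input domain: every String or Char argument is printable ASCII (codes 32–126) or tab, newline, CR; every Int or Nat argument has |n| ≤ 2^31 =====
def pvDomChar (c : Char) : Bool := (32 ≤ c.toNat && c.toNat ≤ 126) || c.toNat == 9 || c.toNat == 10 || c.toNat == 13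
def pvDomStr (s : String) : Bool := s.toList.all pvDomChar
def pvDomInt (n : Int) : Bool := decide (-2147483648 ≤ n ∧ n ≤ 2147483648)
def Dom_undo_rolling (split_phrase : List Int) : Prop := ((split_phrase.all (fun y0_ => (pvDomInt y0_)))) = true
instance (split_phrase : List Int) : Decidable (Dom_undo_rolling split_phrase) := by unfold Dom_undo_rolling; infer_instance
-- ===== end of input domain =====

-- B walks the list block-wise (chunks of rolling_step with a block counter) instead of
-- computing i // rolling_step at every index; same return value, stated as Claim_equal.

-- ===== PORT A =====
-- rolling_step = 8
def rolling_step : Int := 8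

-- literal port of A: fold over range(len(split_phrase)), appending str(x[i] - i//8).
-- split_phrase[i] with i always in range: pyGetD with default 0 is exact here (no IndexError possible).
def undo_rolling (split_phrase : List Int) : String :=
  (PySem.List.pyRange 0 split_phrase.length 1).foldl
    (fun rolling_message i =>
      rolling_message ++ PySem.Int.toStr (PySem.List.pyGetD split_phrase i 0 - PySem.Int.floordiv i rolling_step))
    ""

-- ===== PORT B =====
-- port of Source B's while-loop: recursion on the remaining chunk, block counter carried along;
-- chunk[:8] / chunk[8:] have nonnegative bounds, so List.take / List.drop are exact.
def undo_rolling_altGo (chunk : List Int) (block : Int) : String :=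
  match chunk with
  | [] => ""
  | x :: rest =>
      String.join (((x :: rest).take 8).map (fun y => PySem.Int.toStr (y - block))) ++
        undo_rolling_altGo ((x :: rest).drop 8) (block + 1)
  termination_by chunk.length
  decreasing_by simp

def undo_rolling_alt (split_phrase : List Int) : String :=
  undo_rolling_altGo split_phrase 0

-- ===== PRECONDITION & SPEC =====
def Spec_undo_rolling (split_phrase : List Int) (out : String) : Prop := out = undo_rolling_alt split_phrase
instance (split_phrase : List Int) (out : String) : Decidable (Spec_undo_rolling split_phrase out) := by unfold Spec_undo_rolling; infer_instance

-- ===== CLAIM (what is proved, stated in full; the proofs are below) =====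
def Claim_equal_undo_rolling : Prop := ∀ (split_phrase : List Int), Dom_undo_rolling split_phrase → Spec_undo_rolling split_phrase (undo_rolling split_phrase)

-- ===== LEMMAS AND PROOFS =====

-- canonical form both ports are reduced to
def pvCanon (xs : List Int) (b : Int) : String :=
  String.join ((List.range xs.length).map
    (fun k => PySem.Int.toStr (xs.getD k 0 - (b + ((k / 8 : Nat) : Int)))))

theorem pv_foldl_join : ∀ (l : List String) (a : String),
    l.foldl (· ++ ·) a = a ++ String.join l := by
  intro l
  induction l with
  | nil => intro a; simp [String.join]
  | cons x t ih =>
      intro a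
      have hx : String.join (x :: t) = x ++ String.join t := by
        have e : ("" : String) ++ x = x := by simp
        simp only [String.join, List.foldl_cons]
        rw [ih ("" ++ x), e]
        rfl
      simp only [List.foldl_cons]
      rw [ih (a ++ x), hx, String.append_assoc]

theorem pv_join_cons (s : String) (l : List String) :
    String.join (s :: l) = s ++ String.join l := by
  simp only [String.join, List.foldl_cons]
  rw [pv_foldl_join l ("" ++ s)]
  simp [String.join]

theorem pv_join_append (a b : List String) :
    String.join (a ++ b) = String.join a ++ String.join b := by
  induction a with
  | nil => simp [String.join]
  | cons x t ih => simp only [List.cons_append, pv_join_cons, ih, String.append_assoc]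

theorem pv_foldl_str (l : List Int) (f : Int → String) :
    ∀ acc, l.foldl (fun a x => a ++ f x) acc = acc ++ String.join (l.map f) := by
  induction l with
  | nil => intro acc; simp [String.join]
  | cons x t ih =>
      intro acc
      simp only [List.foldl_cons, List.map_cons, pv_join_cons, ih, String.append_assoc]

theorem pv_range_map_getD {β : Type} (f : Int → β) (d : Int) :
    ∀ (l : List Int), (List.range l.length).map (fun k => f (l.getD k d)) = l.map f := by
  intro l
  induction l with
  | nil => simp
  | cons x t ih =>
      simp only [List.length_cons, List.range_succ_eq_map, List.map_cons, List.map_map]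
      simpa using ih

-- A reduced to canonical form
theorem pv_a_canon (xs : List Int) : undo_rolling xs = pvCanon xs 0 := by
  unfold undo_rolling pvCanon
  rw [pv_foldl_str]
  rw [PySem.List.pyRange_one]
  simp only [List.map_map, Int.sub_zero, Int.toNat_natCast]
  rw [show ∀ s : String, "" ++ s = s from fun s => by simp]
  congr 1
  apply List.map_congr_left
  intro k _
  simp only [Function.comp_apply]
  have h8 : PySem.Int.floordiv (0 + (k : Int)) rolling_step = ((k / 8 : Nat) : Int) := by
    simpa [rolling_step] using PySem.Int.floordiv_natCast k 8
  rw [h8]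
  simp [PySem.List.pyGetD_natCast]

-- B reduced to canonical form (strong induction on length, via fuel n)
theorem pv_b_canon_aux : ∀ (n : Nat) (xs : List Int), xs.length ≤ n →
    ∀ b, undo_rolling_altGo xs b = pvCanon xs b := by
  intro n
  induction n with
  | zero =>
      intro xs hx b
      have : xs = [] := List.length_eq_zero_iff.mp (Nat.le_zero.mp hx)
      subst this
      simp [undo_rolling_altGo, pvCanon, String.join]
  | succ n ih =>
      intro xs hx b
      match xs with
      | [] => simp [undo_rolling_altGo, pvCanon, String.join]
      | x :: rest =>
        rw [undo_rolling_altGo]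
        have hd : ((x :: rest).drop 8).length ≤ n := by
          simp only [List.length_drop, List.length_cons] at *
          omega
        rw [ih ((x :: rest).drop 8) hd (b + 1)]
        set l := x :: rest with hl
        have hlen : l.length = min 8 l.length + (l.length - min 8 l.length) := by omega
        unfold pvCanon
        rw [hlen, List.range_add, List.map_append, pv_join_append]
        congr 1
        · -- first block: elements of l.take 8, block offset 0
          have hm : (l.take 8).length = min 8 l.length := List.length_take
          rw [show ((List.range (min 8 l.length)).map
                (fun k => PySem.Int.toStr (l.getD k 0 - (b + ((k / 8 : Nat) : Int))))) =
              ((List.range (l.take 8).length).map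
                (fun k => PySem.Int.toStr ((l.take 8).getD k 0 - b))) from ?_]
          · rw [pv_range_map_getD (fun y => PySem.Int.toStr (y - b)) 0 (l.take 8)]
          · rw [hm]
            apply List.map_congr_left
            intro k hk
            simp only [List.mem_range] at hk
            have hk8 : k < 8 := lt_of_lt_of_le hk (Nat.min_le_left _ _)
            have hdiv : k / 8 = 0 := Nat.div_eq_of_lt hk8
            have hget : l.getD k 0 = (l.take 8).getD k 0 := by
              simp only [List.getD_eq_getElem?_getD, List.getElem?_take]
              simp [hk8]
            rw [hdiv, hget]
            simp
        · -- remaining blocks: l.drop 8 with the block counter advanced by one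
          rcases Nat.le_total l.length 8 with hle | hge
          · have h1 : l.length - min 8 l.length = 0 := by
              rw [Nat.min_eq_right hle]; omega
            have h2 : l.drop 8 = [] := List.drop_eq_nil_of_le hle
            rw [h1, h2]
            simp [String.join]
          · have h8m : min 8 l.length = 8 := by omega
            rw [List.length_drop, h8m, List.map_map]
            apply congrArg
            apply List.map_congr_left
            intro k hk
            simp only [List.mem_range] at hk
            simp only [Function.comp_apply]
            have hget : (l.drop 8).getD k 0 = l.getD (8 + k) 0 := by
              simp only [List.getD_eq_getElem?_getD, List.getElem?_drop]
            have hdiv : ((8 + k) / 8 : Nat) = 1 + k / 8 := by omega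
            rw [hget, hdiv]
            congr 1
            push_cast
            ring

-- ===== VERDICT (by name: the statement is the Claim_ definition above) =====
theorem undo_rolling_spec : Claim_equal_undo_rolling := by
  intro xs _
  unfold Spec_undo_rolling undo_rolling_alt
  rw [pv_a_canon, pv_b_canon_aux xs.length xs le_rfl 0]
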